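-- pv_equiv track=rewrite | github.com/been-jamming/CORE | generate_docs.py | index_file
-- ===== SOURCE A (Python) =====
-- def index_file(lines, name):
-- 	results = []
-- 	lines_iter = iter(lines)
-- 	line = next(lines_iter, None)
-- 	line_num = 0
-- 	while line:
-- 		if line[:7] == "define ":
-- 			definition_name = line.split(":")[0].split()[1]
-- 			if "(" in definition_name:
-- 				definition_name = definition_name.split("(")[0]
-- 			definition_description = ""
-- 			definition_line_num = line_num - 1
-- 			while definition_line_num and lines[definition_line_num][:2] == "//":
-- 				definition_description = lines[definition_line_num][2:] + definition_description
-- 				definition_line_num -= 1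
-- 			definition_description = definition_description.replace("\n", "<br>")
-- 			results.append(("definition", definition_name, definition_description, line, name))
-- 		if line[:6] == "axiom ":
-- 			axiom_name = line.split(":")[0].split()[1]
-- 			if "[" in axiom_name:
-- 				axiom_name = axiom_name.split("[")[0]
-- 			axiom_description = ""
-- 			axiom_line_num = line_num - 1
-- 			while axiom_line_num and lines[axiom_line_num][:2] == "//":
-- 				axiom_description = lines[axiom_line_num][2:] + axiom_description
-- 				axiom_line_num -= 1
-- 			axiom_description = axiom_description.replace("\n", "<br>")
-- 			results.append(("axiom", axiom_name, axiom_description, line, name))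
-- 		if line[:6] == "prove ":
-- 			proof_name = line.split(":")[0].split()[1]
-- 			if "[" in proof_name:
-- 				proof_name = proof_name.split("[")[0]
-- 			proof_description = ""
-- 			proof_line_num = line_num - 1
-- 			while proof_line_num and lines[proof_line_num][:2] == "//":
-- 				proof_description = lines[proof_line_num][2:] + proof_description
-- 				proof_line_num -= 1
-- 			proof_code = line
-- 			line = next(lines_iter, None)
-- 			line_num += 1
-- 			while line and line[0] != "}":
-- 				proof_code += line
-- 				line = next(lines_iter, None)
-- 				line_num += 1
-- 			proof_code += "}"
-- 			proof_description = proof_description.replace("\n", "<br>")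
-- 			results.append(("proof", proof_name, proof_description, proof_code, name))
-- 		line = next(lines_iter, None)
-- 		line_num += 1
-- 	return results
-- ===== SOURCE B (Python) =====
-- def index_file(lines, name):
--     KINDS = (("define ", "definition", "("), ("axiom ", "axiom", "["), ("prove ", "proof", "["))
--     results = []
--     buf = []
--     i, n = 0, len(lines)
--     while i < n and lines[i]:
--         line = lines[i]
--         hit = next((k for k in KINDS if line.startswith(k[0])), None)
--         if hit is None:
--             if line.startswith("//"):
--                 buf.append(line[2:])
--             else:
--                 buf = []
--             i += 1
--             continue
--         _prefix, kind, cut = hit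
--         ident = line.split(":")[0].split()[1].split(cut)[0]
--         desc = "".join(buf).replace("\n", "<br>")
--         buf = []
--         code = line
--         if kind == "proof":
--             i += 1
--             while i < n and lines[i] and not lines[i].startswith("}"):
--                 code += lines[i]
--                 i += 1
--             code += "}"
--         results.append((kind, ident, desc, code, name))
--         i += 1
--     return results
-- ===== Notes on version B (the rewrite author's own statement) =====
-- stated objective: alternative
-- what changed: B replaces A's backward re-scan of the lines list at every declaration by a single forward pass that buffers the current run of '//' comment lines, and replaces A's three near-identical define/axiom/prove blocks by one table-driven branch; Pre_ excludes inputs where a define/axiom/prove line lacks a second token before ':', on which A raises IndexError when it parses such a line.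
-- intended difference: On inputs where the description scan for the first declaration touches line 0 - a declaration on line 0 with trailing '//' lines (A's backward scan wraps to negative indices and returns those trailing comments) or an initial '//' comment run with nonempty line-0 text ending at a declaration (A's scan stops at index 0 and drops that comment) - A returns the accidental description while B returns the intended one: exactly the comment lines directly above the declaration. — e.g. on index_file(["//d", "define x:"], "m"): A returns [("definition", "x", "", "define x:", "m")], B returns [("definition", "x", "d", "define x:", "m")]
-- outside the precondition, e.g. on index_file(['', 'define '], 'm'): A returns [], B returns []
import Mathlib
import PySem

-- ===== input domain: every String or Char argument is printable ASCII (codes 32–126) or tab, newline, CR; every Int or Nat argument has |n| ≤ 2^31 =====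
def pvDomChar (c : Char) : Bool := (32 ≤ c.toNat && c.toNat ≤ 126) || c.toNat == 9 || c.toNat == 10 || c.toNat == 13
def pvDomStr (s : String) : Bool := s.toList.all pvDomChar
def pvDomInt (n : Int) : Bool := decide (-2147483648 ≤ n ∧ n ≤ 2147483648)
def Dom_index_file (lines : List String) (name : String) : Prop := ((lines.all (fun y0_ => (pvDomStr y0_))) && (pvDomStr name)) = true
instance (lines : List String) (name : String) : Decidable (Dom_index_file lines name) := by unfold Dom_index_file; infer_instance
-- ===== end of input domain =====

-- B replaces A's backward re-scan of comment lines by ONE forward pass that keeps the current run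
-- of "//" lines in a buffer and unifies the three near-identical declaration blocks into one
-- table-driven branch (objective: alternative); on D_ (the description scan of the first
-- declaration touching line 0) A returns an accidental description, B the comments directly above.


-- ===== PORT A =====
-- A's backward scan `while line_num and lines[line_num][:2] == "//"`; fuel (lines.length+1) only
-- makes the recursion structural — it is never exhausted on the inputs the ports are run on.
def pvDescScan (lines : List String) (fuel : Nat) (idx : Int) (acc : List Char) : List Char :=
  match fuel with
  | 0 => acc
  | f + 1 =>
    if idx = 0 then acc
    else
      match PySem.List.pyGet? lines idx with
      | none => acc
      | some l =>
        if PySem.List.slice l.toList none (some 2) = ['/', '/'] then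
          pvDescScan lines f (idx - 1) (PySem.List.slice l.toList (some 2) none ++ acc)
        else acc

-- A's inner proof-body loop: consumes lines until a falsy line or one starting with "}";
-- returns (proof_code ++ "}", rest after the terminator, line_num of the line after it).
def pvABody (rest : List String) (idx : Int) (code : List Char) : List Char × List String × Int :=
  match rest with
  | [] => (code ++ ['}'], [], idx + 1)
  | l :: rs =>
    if l = "" ∨ PySem.List.pyGet? l.toList 0 = some '}' then (code ++ ['}'], rs, idx + 1)
    else pvABody rs (idx + 1) (code ++ l.toList)

-- A's outer `while line:` loop; fuel only makes the recursion structural (never exhausted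
-- when started with rest.length + 1, since every step consumes at least one line).
def pvALoop (lines : List String) (name : String) (fuel : Nat) (rest : List String) (n : Int) :
    List (String × String × String × String × String) :=
  match fuel, rest with
  | 0, _ => []
  | _, [] => []
  | f + 1, line :: rs =>
    if line = "" then []
    else
      let cs := line.toList
      if PySem.List.slice cs none (some 7) = "define ".toList then
        let tok := (PySem.Chars.split₀ ((PySem.Chars.splitOn cs [':']).headD [])).getD 1 []
        let nm := if PySem.Chars.isIn ['('] tok then (PySem.Chars.splitOn tok ['(']).headD [] else tok
        let desc := PySem.Chars.replace (pvDescScan lines (lines.length + 1) (n - 1) []) ['\n'] "<br>".toList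
        ("definition", String.ofList nm, String.ofList desc, line, name) :: pvALoop lines name f rs (n + 1)
      else if PySem.List.slice cs none (some 6) = "axiom ".toList then
        let tok := (PySem.Chars.split₀ ((PySem.Chars.splitOn cs [':']).headD [])).getD 1 []
        let nm := if PySem.Chars.isIn ['['] tok then (PySem.Chars.splitOn tok ['[']).headD [] else tok
        let desc := PySem.Chars.replace (pvDescScan lines (lines.length + 1) (n - 1) []) ['\n'] "<br>".toList
        ("axiom", String.ofList nm, String.ofList desc, line, name) :: pvALoop lines name f rs (n + 1)
      else if PySem.List.slice cs none (some 6) = "prove ".toList then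
        let tok := (PySem.Chars.split₀ ((PySem.Chars.splitOn cs [':']).headD [])).getD 1 []
        let nm := if PySem.Chars.isIn ['['] tok then (PySem.Chars.splitOn tok ['[']).headD [] else tok
        let desc := PySem.Chars.replace (pvDescScan lines (lines.length + 1) (n - 1) []) ['\n'] "<br>".toList
        let r := pvABody rs (n + 1) cs
        ("proof", String.ofList nm, String.ofList desc, String.ofList r.1, name) :: pvALoop lines name f r.2.1 r.2.2
      else pvALoop lines name f rs (n + 1)

def index_file (lines : List String) (name : String) : List (String × String × String × String × String) :=
  pvALoop lines name (lines.length + 1) lines 0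

-- ===== PORT B =====
-- the KINDS table of Source B: (prefix, kind, cut character)
def pvKinds : List (List Char × String × Char) :=
  [("define ".toList, "definition", '('), ("axiom ".toList, "axiom", '['), ("prove ".toList, "proof", '[')]

-- Source B: line.split(":")[0].split()[1].split(cut)[0]
def pvIdentB (cs : List Char) (cut : Char) : List Char :=
  (PySem.Chars.splitOn ((PySem.Chars.split₀ ((PySem.Chars.splitOn cs [':']).headD [])).getD 1 []) [cut]).headD []

-- Source B's proof-body loop: returns (code ++ "}", index of the terminating line or lines.length);
-- fuel only makes the recursion structural (never exhausted when started at lines.length + 1).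
def pvBBody (lines : List String) (fuel : Nat) (i : Nat) (code : List Char) : List Char × Nat :=
  match fuel with
  | 0 => (code ++ ['}'], i)
  | f + 1 =>
    if h : i < lines.length then
      let l := lines[i]
      if l ≠ "" ∧ ¬ PySem.Chars.startswith l.toList ['}'] then
        pvBBody lines f (i + 1) (code ++ l.toList)
      else (code ++ ['}'], i)
    else (code ++ ['}'], i)

-- Source B's single forward pass: buf is the buffered run of "//" lines (their line[2:] slices).
def pvBLoop (lines : List String) (name : String) (fuel : Nat) (i : Nat) (buf : List (List Char)) :
    List (String × String × String × String × String) :=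
  match fuel with
  | 0 => []
  | f + 1 =>
    if h : i < lines.length then
      let line := lines[i]
      if line = "" then []
      else
        match pvKinds.find? (fun k => PySem.Chars.startswith line.toList k.1) with
        | none =>
          if PySem.Chars.startswith line.toList ['/', '/'] then
            pvBLoop lines name f (i + 1) (buf ++ [PySem.List.slice line.toList (some 2) none])
          else pvBLoop lines name f (i + 1) []
        | some k =>
          let ident := pvIdentB line.toList k.2.2
          let desc := PySem.Chars.replace (PySem.Chars.join [] buf) ['\n'] "<br>".toList
          if k.2.1 = "proof" then
            let r := pvBBody lines (lines.length + 1) (i + 1) line.toList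
            (k.2.1, String.ofList ident, String.ofList desc, String.ofList r.1, name) :: pvBLoop lines name f (r.2 + 1) []
          else
            (k.2.1, String.ofList ident, String.ofList desc, line, name) :: pvBLoop lines name f (i + 1) []
    else []

def index_file_alt (lines : List String) (name : String) : List (String × String × String × String × String) :=
  pvBLoop lines name (lines.length + 1) 0 []

-- ===== PRECONDITION & SPEC =====
def pvIsDeclLine (s : String) : Bool :=
  PySem.Chars.startswith s.toList "define ".toList || PySem.Chars.startswith s.toList "axiom ".toList ||
    PySem.Chars.startswith s.toList "prove ".toList

-- Pre_ excludes inputs on which A raises IndexError: a "define "/"axiom "/"prove " line with no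
-- second whitespace token before the first ':'.  For simplicity the condition quantifies over ALL
-- lines of the file, so it also excludes some inputs A returns on (such a malformed line occurring
-- only inside a proof body or after a falsy line, where A never parses it); see claim.json "cites".
def Pre_index_file (lines : List String) (name : String) : Prop :=
  (lines.all fun l =>
    !pvIsDeclLine l || decide (2 ≤ (PySem.Chars.split₀ ((PySem.Chars.splitOn l.toList [':']).headD [])).length)) = true

instance (lines : List String) (name : String) : Decidable (Pre_index_file lines name) := by
  unfold Pre_index_file; infer_instance

def pvWitness_index_file : List String × String := (["//doc", "define x: y", "axiom a[0]: b"], "m")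

-- On inputs where the description scan of the FIRST declaration touches line 0 — either the file
-- starts with a declaration and ends in "//" lines (A's backward scan wraps to negative indices
-- and returns those trailing comments) or it starts with a "//" comment run with nonempty line-0
-- text that ends at a declaration (A's scan stops at index 0 and drops that comment) — A returns
-- the accidental description while B returns the intended one: the comments directly above.
def D_index_file (lines : List String) (name : String) : Prop :=
  (2 ≤ lines.length ∧ pvIsDeclLine (lines.headD "") = true ∧
    ∃ l ∈ lines.reverse.takeWhile (fun s => PySem.Chars.startswith s.toList ['/', '/']), 3 ≤ l.toList.length)
  ∨ (PySem.Chars.startswith (lines.headD "").toList ['/', '/'] = true ∧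
      3 ≤ (lines.headD "").toList.length ∧
      pvIsDeclLine (lines.getD
        (lines.takeWhile (fun s => PySem.Chars.startswith s.toList ['/', '/'])).length "") = true)

instance (lines : List String) (name : String) : Decidable (D_index_file lines name) := by
  unfold D_index_file; infer_instance

def Spec_index_file (lines : List String) (name : String)
    (out : List (String × String × String × String × String)) : Prop :=
  ¬ D_index_file lines name → out = index_file_alt lines name

instance (lines : List String) (name : String) (out : List (String × String × String × String × String)) :
    Decidable (Spec_index_file lines name out) := by unfold Spec_index_file; infer_instance

def pvDiffWitness_index_file : List String × String := (["//d", "define x:"], "m")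

def pvDiffWitnessOut_index_file :
    (List (String × String × String × String × String)) × (List (String × String × String × String × String)) :=
  ([("definition", "x", "", "define x:", "m")], [("definition", "x", "d", "define x:", "m")])

-- ===== CLAIM =====
def Claim_unchanged_index_file : Prop := ∀ (lines : List String) (name : String),
  Dom_index_file lines name → Pre_index_file lines name → Spec_index_file lines name (index_file lines name)

def Claim_changed_index_file : Prop :=
  Dom_index_file (pvDiffWitness_index_file.1) (pvDiffWitness_index_file.2) ∧
  Pre_index_file (pvDiffWitness_index_file.1) (pvDiffWitness_index_file.2) ∧
  D_index_file (pvDiffWitness_index_file.1) (pvDiffWitness_index_file.2) ∧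
  index_file (pvDiffWitness_index_file.1) (pvDiffWitness_index_file.2) = pvDiffWitnessOut_index_file.1 ∧
  index_file_alt (pvDiffWitness_index_file.1) (pvDiffWitness_index_file.2) = pvDiffWitnessOut_index_file.2 ∧
  pvDiffWitnessOut_index_file.1 ≠ pvDiffWitnessOut_index_file.2

def Claim_exact_index_file : Prop := ∀ (lines : List String) (name : String),
  Dom_index_file lines name → Pre_index_file lines name → D_index_file lines name →
    index_file lines name ≠ index_file_alt lines name

-- ===== LEMMAS AND PROOFS =====

-- name extraction: A's conditional "(" / "[" split equals B's unconditional split(cut)[0]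
theorem pvGoNotMem (c : Char) : ∀ (fuel : Nat) (l cur : List Char) (acc : List (List Char)),
    c ∉ l → PySem.Chars.splitOn.go [c] fuel l cur acc = acc.reverse ++ [cur.reverse ++ l] := by
  intro fuel
  induction fuel with
  | zero => intro l cur acc h; simp [PySem.Chars.splitOn.go]
  | succ f ih =>
    intro l cur acc h
    cases l with
    | nil => simp [PySem.Chars.splitOn.go]
    | cons a rest =>
      rw [PySem.Chars.splitOn.go]
      have hnp : ¬ ([c].isPrefixOf (a :: rest) = true) := by
        simp [List.isPrefixOf]
        intro hc; exact absurd (hc ▸ List.mem_cons_self) h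
      rw [if_neg hnp, ih rest (a :: cur) acc (fun hm => h (List.mem_cons_of_mem a hm))]
      simp

theorem pvSplitOnNotMem (l : List Char) (c : Char) (h : c ∉ l) :
    PySem.Chars.splitOn l [c] = [l] := by
  unfold PySem.Chars.splitOn
  rw [pvGoNotMem c _ l [] [] h]
  simp

theorem pvIdentEq (tok : List Char) (c : Char) :
    (if PySem.Chars.isIn [c] tok then (PySem.Chars.splitOn tok [c]).headD [] else tok)
      = (PySem.Chars.splitOn tok [c]).headD [] := by
  by_cases h : PySem.Chars.isIn [c] tok = true
  · rw [if_pos h]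
  · rw [if_neg h]
    have hc : c ∉ tok := by
      intro hm
      exact h ((PySem.Chars.isIn_iff_infix [c] tok).2 ((List.singleton_infix_iff c tok).2 hm))
    rw [pvSplitOnNotMem tok c hc]
    rfl

-- slices vs startswith
theorem pvSliceEqPrefix (cs p : List Char) (n : Nat) (hn : p.length = n) :
    (PySem.List.slice cs none (some (n:Int)) = p) ↔ PySem.Chars.startswith cs p = true := by
  rw [PySem.List.slice_to_natCast, PySem.Chars.startswith_iff, List.prefix_iff_eq_take, hn]
  exact ⟨fun h => h.symm, fun h => h.symm⟩

theorem pvIsDefine (cs : List Char) :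
    (PySem.List.slice cs none (some (7:Int)) = "define ".toList) ↔
      PySem.Chars.startswith cs "define ".toList = true := by
  exact_mod_cast pvSliceEqPrefix cs "define ".toList 7 (by decide)

theorem pvIsAxiom (cs : List Char) :
    (PySem.List.slice cs none (some (6:Int)) = "axiom ".toList) ↔
      PySem.Chars.startswith cs "axiom ".toList = true := by
  exact_mod_cast pvSliceEqPrefix cs "axiom ".toList 6 (by decide)

theorem pvIsProve (cs : List Char) :
    (PySem.List.slice cs none (some (6:Int)) = "prove ".toList) ↔
      PySem.Chars.startswith cs "prove ".toList = true := by
  exact_mod_cast pvSliceEqPrefix cs "prove ".toList 6 (by decide)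

theorem pvSlice2Iff (cs : List Char) :
    (PySem.List.slice cs none (some (2:Int)) = ['/', '/']) ↔
      PySem.Chars.startswith cs ['/', '/'] = true := by
  exact_mod_cast pvSliceEqPrefix cs ['/', '/'] 2 (by decide)

theorem pvSliceFrom2 (cs : List Char) :
    PySem.List.slice cs (some (2:Int)) none = cs.drop 2 := by
  rw [(by norm_num : (2:Int) = ((2:Nat):Int)), PySem.List.slice_from_natCast]

theorem pvSlice2OfPrefix (cs p : List Char) (h : PySem.Chars.startswith cs p = true) (h2 : 2 <= p.length) :
    PySem.List.slice cs none (some (2:Int)) = p.take 2 := by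
  rw [(by norm_num : (2:Int) = ((2:Nat):Int)), PySem.List.slice_to_natCast]
  rcases (PySem.Chars.startswith_iff cs p).1 h with ⟨t, ht⟩
  subst ht
  rw [List.take_append_of_le_length h2]

theorem pvDeclNotComment (s : String) (h : pvIsDeclLine s = true) :
    PySem.List.slice s.toList none (some (2:Int)) ≠ ['/', '/'] := by
  unfold pvIsDeclLine at h
  rcases Bool.or_eq_true_iff.1 h with h' | hp
  · rcases Bool.or_eq_true_iff.1 h' with hd | ha
    · rw [pvSlice2OfPrefix _ _ hd (by decide)]; decide
    · rw [pvSlice2OfPrefix _ _ ha (by decide)]; decide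
  · rw [pvSlice2OfPrefix _ _ hp (by decide)]; decide

-- a "//" comment line satisfies none of the three declaration prefixes
theorem pvCommentNotDecl (s : String) (h : PySem.Chars.startswith s.toList ['/', '/'] = true) :
    pvIsDeclLine s = false := by
  rcases (PySem.Chars.startswith_iff _ _).1 h with ⟨t, ht⟩
  unfold pvIsDeclLine
  simp only [Bool.or_eq_false_iff]
  refine ⟨⟨?_, ?_⟩, ?_⟩ <;>
  · rw [Bool.eq_false_iff]
    intro hc
    rcases (PySem.Chars.startswith_iff _ _).1 hc with ⟨u, hu⟩
    rw [← ht] at hu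
    exact absurd (congrArg (List.head? ·) hu) (by simp)

theorem pvTermNotComment (s : String)
    (h : s = "" ∨ PySem.Chars.startswith s.toList ['}'] = true) :
    PySem.List.slice s.toList none (some (2:Int)) ≠ ['/', '/'] := by
  rcases h with h | h
  · subst h; decide
  · rcases (PySem.Chars.startswith_iff _ _).1 h with ⟨u, hu⟩
    rw [(by norm_num : (2:Int) = ((2:Nat):Int)), PySem.List.slice_to_natCast, ← hu]
    cases u <;> simp

-- "".join is concatenation
theorem pvJoinFlatten (buf : List (List Char)) : PySem.Chars.join [] buf = buf.flatten := by
  unfold PySem.Chars.join List.intercalate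
  induction buf with
  | nil => simp
  | cons a l ih =>
    cases l with
    | nil => simp
    | cons b t => simp_all [List.intersperse]

theorem pvHeadBrace (l : String) (h : ¬ l = "") :
    (PySem.List.pyGet? l.toList 0 = some '}') ↔ PySem.Chars.startswith l.toList ['}'] = true := by
  cases hcs : l.toList with
  | nil => exact absurd (by simpa using congrArg String.ofList hcs) h
  | cons a t =>
    rw [PySem.Chars.startswith_iff]
    constructor
    · intro hg
      have : a = '}' := by simpa [PySem.List.pyGet?, PySem.List.pyIdx?] using hg
      simp [this]
    · intro hp
      rcases hp with ⟨u, hu⟩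
      cases hu
      simp [PySem.List.pyGet?, PySem.List.pyIdx?]

theorem pvPyGetNeg (xs : List String) (k : Nat) (h1 : 1 ≤ k) (h2 : k ≤ xs.length) :
    PySem.List.pyGet? xs (-(k:Int)) = xs[xs.length - k]? := by
  unfold PySem.List.pyGet? PySem.List.pyIdx?
  have hk0 : ¬ (0 ≤ -(k:Int)) := by omega
  rw [if_neg hk0, if_pos (by omega)]
  simp

theorem pvMemTakeWhileReverse {α : Type} (p : α → Bool) (xs : List α) (j : Nat) (hj : j < xs.length)
    (hsuf : ∀ j' (h' : j' < xs.length), j ≤ j' → p xs[j'] = true) :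
    xs[j] ∈ xs.reverse.takeWhile p := by
  have hsplit : xs.reverse = (xs.drop j).reverse ++ (xs.take j).reverse := by
    rw [← List.reverse_append, List.take_append_drop]
  rw [hsplit, List.takeWhile_append]
  have hall : ∀ a ∈ (xs.drop j).reverse, p a = true := by
    intro a ha
    rw [List.mem_reverse] at ha
    rcases List.mem_iff_getElem.1 ha with ⟨k, hk, hka⟩
    rw [List.getElem_drop] at hka
    exact hka ▸ hsuf (j + k) (by simp at hk; omega) (by omega)
  rw [if_pos (by rw [List.takeWhile_eq_self_iff.2 hall])]
  apply List.mem_append_left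
  rw [List.mem_reverse]
  exact List.mem_iff_getElem.2 ⟨0, by simp; omega, by simp [List.getElem_drop]⟩

-- ----- backward-scan lemmas -----
theorem pvScan_zero (lines : List String) (f : Nat) (acc : List Char) :
    pvDescScan lines f 0 acc = acc := by
  cases f <;> simp [pvDescScan]

theorem pvScan_acc (lines : List String) :
    ∀ (f : Nat) (idx : Int) (acc : List Char),
      pvDescScan lines f idx acc = pvDescScan lines f idx [] ++ acc := by
  intro f
  induction f with
  | zero => intro idx acc; simp [pvDescScan]
  | succ f ih =>
    intro idx acc
    by_cases h0 : idx = 0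
    · subst h0; simp [pvScan_zero]
    · simp only [pvDescScan, if_neg h0]
      cases hg : PySem.List.pyGet? lines idx with
      | none => simp
      | some l =>
        by_cases hc : PySem.List.slice l.toList none (some 2) = ['/', '/']
        · simp only [if_pos hc]
          rw [ih (idx - 1) (PySem.List.slice l.toList (some 2) none ++ acc),
              ih (idx - 1) (PySem.List.slice l.toList (some 2) none ++ [])]
          simp
        · simp [if_neg hc]

theorem pvScan_stop (lines : List String) (f : Nat) (i : Nat) (acc : List Char)
    (h : ∀ l, lines[i]? = some l → PySem.List.slice l.toList none (some 2) ≠ ['/', '/']) :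
    pvDescScan lines f (i:Int) acc = acc := by
  cases f with
  | zero => rfl
  | succ f =>
    by_cases h0 : (i:Int) = 0
    · rw [h0, pvScan_zero]
    · simp only [pvDescScan, if_neg h0, PySem.List.pyGet?_natCast]
      cases hg : lines[i]? with
      | none => simp
      | some l => simp [if_neg (h l hg)]

theorem pvScan_fuel (lines : List String) :
    ∀ (i : Nat) (f g : Nat) (acc : List Char), i < f → i < g →
      pvDescScan lines f (i:Int) acc = pvDescScan lines g (i:Int) acc := by
  intro i
  induction i with
  | zero => intro f g acc _ _; push_cast; rw [pvScan_zero, pvScan_zero]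
  | succ i ih =>
    intro f g acc hf hg
    cases f with
    | zero => omega
    | succ f =>
      cases g with
      | zero => omega
      | succ g =>
        have h0 : ¬ ((i + 1 : Nat) : Int) = 0 := by omega
        simp only [pvDescScan, if_neg h0]
        cases hgel : PySem.List.pyGet? lines ((i + 1 : Nat) : Int) with
        | none => rfl
        | some l =>
          by_cases hc : PySem.List.slice l.toList none (some 2) = ['/', '/']
          · simp only [if_pos hc]
            have hcast : ((i + 1 : Nat) : Int) - 1 = (i : Int) := by omega
            rw [hcast]
            exact ih f g _ (by omega) (by omega)
          · simp [if_neg hc]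

theorem pvScan_push (lines : List String) (i : Nat) (h1 : 1 ≤ i) (h2 : i < lines.length)
    (hc : PySem.List.slice (lines[i]).toList none (some 2) = ['/', '/']) :
    pvDescScan lines (lines.length + 1) (((i + 1 : Nat) : Int) - 1) []
      = pvDescScan lines (lines.length + 1) ((i : Int) - 1) []
          ++ PySem.List.slice (lines[i]).toList (some 2) none := by
  have hcast : ((i + 1 : Nat) : Int) - 1 = (i : Int) := by omega
  rw [hcast]
  have h0 : ¬ ((i : Nat) : Int) = 0 := by omega
  conv_lhs => rw [pvDescScan]
  rw [if_neg h0, PySem.List.pyGet?_natCast]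
  have hge : lines[i]? = some (lines[i]) := List.getElem?_eq_getElem h2
  rw [hge]
  simp only [if_pos hc]
  rw [pvScan_acc]
  simp only [List.append_nil]
  congr 1
  have hcast2 : ((i : Nat) : Int) - 1 = ((i - 1 : Nat) : Int) := by omega
  rw [hcast2]
  exact pvScan_fuel lines (i - 1) lines.length (lines.length + 1) [] (by omega) (by omega)

theorem pvScanNeg (lines : List String) :
    ∀ (f : Nat) (k : Nat) (acc : List Char), 1 ≤ k → k ≤ lines.length →
      (∀ (h : 0 < lines.length),
        PySem.List.slice (lines[0]).toList none (some (2:Int)) ≠ ['/', '/']) →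
      (∀ l ∈ lines.reverse.takeWhile (fun s => PySem.Chars.startswith s.toList ['/', '/']),
        PySem.List.slice l.toList (some (2:Int)) none = []) →
      (∀ j' (h' : j' < lines.length), lines.length - k < j' →
        PySem.Chars.startswith (lines[j']).toList ['/', '/'] = true) →
      pvDescScan lines f (-(k : Int)) acc = acc := by
  intro f
  induction f with
  | zero => intro k acc _ _ _ _ _; rfl
  | succ f ih =>
    intro k acc hk1 hk2 h0 hshort hsuf
    have hne : ¬ (-(k : Int) = 0) := by omega
    have hidx : lines.length - k < lines.length := by omega
    simp only [pvDescScan, if_neg hne]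
    rw [pvPyGetNeg lines k hk1 hk2, List.getElem?_eq_getElem hidx]
    by_cases hc : PySem.List.slice (lines[lines.length - k]).toList none (some 2) = ['/', '/']
    · simp only [if_pos hc]
      have hsw : PySem.Chars.startswith (lines[lines.length - k]).toList ['/', '/'] = true :=
        (pvSlice2Iff _).1 hc
      have hklen : k < lines.length := by
        rcases Nat.lt_or_ge k lines.length with h | h
        · exact h
        · exfalso
          have : k = lines.length := by omega
          subst this
          exact (h0 (by omega)) (by simpa using hc)
      have hmem : lines[lines.length - k] ∈
          lines.reverse.takeWhile (fun s => PySem.Chars.startswith s.toList ['/', '/']) := by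
        apply pvMemTakeWhileReverse _ lines (lines.length - k) hidx
        intro j' h' hj'
        rcases Nat.lt_or_ge (lines.length - k) j' with h | h
        · exact hsuf j' h' h
        · have : j' = lines.length - k := by omega
          subst this; exact hsw
      rw [hshort _ hmem]
      simp only [List.nil_append]
      have hcast : -(k : Int) - 1 = -((k + 1 : Nat) : Int) := by omega
      rw [hcast]
      exact ih (k + 1) acc (by omega) (by omega) h0 hshort
        (fun j' h' hj' => by
          rcases Nat.lt_or_ge (lines.length - k) j' with h | h
          · exact hsuf j' h' h
          · have : j' = lines.length - k := by omega
            subst this; exact hsw)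
    · simp [if_neg hc]

theorem pvNeg0 (lines : List String) (hlen : 0 < lines.length)
    (hdecl : pvIsDeclLine (lines[0]'hlen) = true)
    (hnW : ¬ (2 ≤ lines.length ∧ pvIsDeclLine (lines.headD "") = true ∧
      ∃ l ∈ lines.reverse.takeWhile (fun s => PySem.Chars.startswith s.toList ['/', '/']),
        3 ≤ l.toList.length)) :
    pvDescScan lines (lines.length + 1) (-1) [] = [] := by
  have h0 : ∀ (h : 0 < lines.length),
      PySem.List.slice ((lines[0]'h)).toList none (some (2:Int)) ≠ ['/', '/'] :=
    fun h => pvDeclNotComment _ hdecl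
  have hshort : ∀ l ∈ lines.reverse.takeWhile (fun s => PySem.Chars.startswith s.toList ['/', '/']),
      PySem.List.slice l.toList (some (2:Int)) none = [] := by
    intro l hl
    have hsw : PySem.Chars.startswith l.toList ['/', '/'] = true := by
      simpa using List.mem_takeWhile_imp hl
    rcases Nat.lt_or_ge lines.length 2 with hs | hs
    · -- a single line: the head is a declaration, so the takeWhile run is empty
      exfalso
      have hml : l ∈ lines := by
        have := (List.takeWhile_sublist _).subset hl
        simpa using this
      cases lines with
      | nil => simp at hlen
      | cons a t =>
        cases t with
        | nil =>
          have hla : l = a := by simpa using hml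
          exact (h0 (by simp)) ((pvSlice2Iff _).2 (by simpa [hla] using hsw))
        | cons b u => simp at hs
    · push_neg at hnW
      have hhd : pvIsDeclLine (lines.headD "") = true := by
        cases lines with
        | nil => simp at hlen
        | cons a t => simpa using hdecl
      have hlt := hnW hs hhd l hl
      rw [pvSliceFrom2]
      exact List.drop_eq_nil_iff.2 (by omega)
  have hmain := pvScanNeg lines (lines.length + 1) 1 [] (by omega) (by omega) h0 hshort
    (fun j' h' hj' => by omega)
  simpa using hmain

-- body loops
theorem pvBodyEq (lines : List String) :
    ∀ (fB : Nat) (j : Nat) (code : List Char), j ≤ lines.length → lines.length - j < fB →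
      pvABody (lines.drop j) (j : Int) code
        = ((pvBBody lines fB j code).1, lines.drop ((pvBBody lines fB j code).2 + 1),
            ((pvBBody lines fB j code).2 : Int) + 1)
      ∧ j ≤ (pvBBody lines fB j code).2 ∧ (pvBBody lines fB j code).2 ≤ lines.length
      ∧ (∀ (h : (pvBBody lines fB j code).2 < lines.length),
          lines[(pvBBody lines fB j code).2] = "" ∨
            PySem.Chars.startswith (lines[(pvBBody lines fB j code).2]).toList ['}'] = true) := by
  intro fB
  induction fB with
  | zero => intro j code hj hf; omega
  | succ f ih =>
    intro j code hj hf
    by_cases hjl : j < lines.length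
    · by_cases hcont : (lines[j] ≠ "" ∧ ¬ PySem.Chars.startswith (lines[j]).toList ['}'] = true)
      · have hB : pvBBody lines (f + 1) j code
            = pvBBody lines f (j + 1) (code ++ (lines[j]).toList) := by
          simp only [pvBBody, dif_pos hjl]
          rw [if_pos hcont]
        rw [hB]
        have hexit : ¬ (lines[j] = "" ∨ PySem.List.pyGet? (lines[j]).toList 0 = some '}') := by
          rintro (h | h)
          · exact hcont.1 h
          · exact hcont.2 ((pvHeadBrace _ hcont.1).1 h)
        rw [List.drop_eq_getElem_cons hjl, pvABody, if_neg hexit]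
        have hcast : ((j : Nat) : Int) + 1 = ((j + 1 : Nat) : Int) := by omega
        rw [hcast]
        obtain ⟨e1, e2, e3, e4⟩ := ih (j + 1) (code ++ (lines[j]).toList) (by omega) (by omega)
        exact ⟨e1, by omega, e3, e4⟩
      · have hB : pvBBody lines (f + 1) j code = (code ++ ['}'], j) := by
          simp only [pvBBody, dif_pos hjl]
          rw [if_neg hcont]
        rw [hB]
        have hexit : (lines[j] = "" ∨ PySem.List.pyGet? (lines[j]).toList 0 = some '}') := by
          by_cases he : lines[j] = ""
          · exact Or.inl he
          · push_neg at hcont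
            exact Or.inr ((pvHeadBrace _ he).2 (hcont he))
        rw [List.drop_eq_getElem_cons hjl, pvABody, if_pos hexit]
        refine ⟨rfl, le_refl _, by omega, ?_⟩
        intro h
        by_cases he : lines[j] = ""
        · exact Or.inl he
        · push_neg at hcont
          exact Or.inr (hcont he)
    · have hB : pvBBody lines (f + 1) j code = (code ++ ['}'], j) := by
        simp only [pvBBody, dif_neg hjl]
      rw [hB]
      rw [List.drop_eq_nil_of_le (by omega : lines.length ≤ j), pvABody]
      refine ⟨?_, le_refl _, by omega, fun h => absurd h hjl⟩
      rw [List.drop_eq_nil_of_le (by omega : lines.length ≤ j + 1)]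

theorem pvFindDefine (cs : List Char) (h : PySem.Chars.startswith cs "define ".toList = true) :
    pvKinds.find? (fun k => PySem.Chars.startswith cs k.1) = some ("define ".toList, "definition", '(') := by
  have h' : PySem.Chars.startswith cs ['d', 'e', 'f', 'i', 'n', 'e', ' '] = true := h
  simp [pvKinds, h']

theorem pvFindAxiom (cs : List Char) (hd : ¬ PySem.Chars.startswith cs "define ".toList = true)
    (h : PySem.Chars.startswith cs "axiom ".toList = true) :
    pvKinds.find? (fun k => PySem.Chars.startswith cs k.1) = some ("axiom ".toList, "axiom", '[') := by
  have hd' : PySem.Chars.startswith cs ['d', 'e', 'f', 'i', 'n', 'e', ' '] = false := Bool.eq_false_iff.2 hd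
  have h' : PySem.Chars.startswith cs ['a', 'x', 'i', 'o', 'm', ' '] = true := h
  simp [pvKinds, List.find?, hd', h']

theorem pvFindProve (cs : List Char) (hd : ¬ PySem.Chars.startswith cs "define ".toList = true)
    (ha : ¬ PySem.Chars.startswith cs "axiom ".toList = true)
    (h : PySem.Chars.startswith cs "prove ".toList = true) :
    pvKinds.find? (fun k => PySem.Chars.startswith cs k.1) = some ("prove ".toList, "proof", '[') := by
  have hd' : PySem.Chars.startswith cs ['d', 'e', 'f', 'i', 'n', 'e', ' '] = false := Bool.eq_false_iff.2 hd
  have ha' : PySem.Chars.startswith cs ['a', 'x', 'i', 'o', 'm', ' '] = false := Bool.eq_false_iff.2 ha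
  have h' : PySem.Chars.startswith cs ['p', 'r', 'o', 'v', 'e', ' '] = true := h
  simp [pvKinds, List.find?, hd', ha', h']

theorem pvFindNone (cs : List Char) (hd : ¬ PySem.Chars.startswith cs "define ".toList = true)
    (ha : ¬ PySem.Chars.startswith cs "axiom ".toList = true)
    (hp : ¬ PySem.Chars.startswith cs "prove ".toList = true) :
    pvKinds.find? (fun k => PySem.Chars.startswith cs k.1) = none := by
  have hd' : PySem.Chars.startswith cs ['d', 'e', 'f', 'i', 'n', 'e', ' '] = false := Bool.eq_false_iff.2 hd
  have ha' : PySem.Chars.startswith cs ['a', 'x', 'i', 'o', 'm', ' '] = false := Bool.eq_false_iff.2 ha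
  have hp' : PySem.Chars.startswith cs ['p', 'r', 'o', 'v', 'e', ' '] = false := Bool.eq_false_iff.2 hp
  simp [pvKinds, List.find?, hd', ha', hp']

-- invariant re-establishment: the scan at a non-comment line stops at once
theorem pvInvStop (lines : List String) (i : Nat)
    (h : ∀ l, lines[i]? = some l → PySem.List.slice l.toList none (some 2) ≠ ['/', '/']) :
    PySem.Chars.join [] ([] : List (List Char))
      = pvDescScan lines (lines.length + 1) (((i + 1 : Nat) : Int) - 1) [] := by
  have hc : (((i + 1 : Nat) : Int) - 1) = ((i : Nat) : Int) := by push_cast; ring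
  rw [hc, pvScan_stop lines _ i [] h, pvJoinFlatten]
  rfl

theorem pvDeclStopAt (lines : List String) (i : Nat) (hi : i < lines.length)
    (h : pvIsDeclLine (lines[i]) = true) :
    ∀ l, lines[i]? = some l → PySem.List.slice l.toList none (some 2) ≠ ['/', '/'] := by
  intro l hl
  rw [List.getElem?_eq_getElem hi] at hl
  cases hl
  exact pvDeclNotComment _ h

theorem pvMain (lines : List String) (name : String) :
    ∀ (fA fB i : Nat) (buf : List (List Char)), 1 ≤ i →
      lines.length - i < fA → lines.length - i < fB →
      PySem.Chars.join [] buf = pvDescScan lines (lines.length + 1) ((i : Int) - 1) [] →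
      pvALoop lines name fA (lines.drop i) (i : Int) = pvBLoop lines name fB i buf := by
  intro fA
  induction fA with
  | zero => intro fB i buf h1 hfA hfB hinv; omega
  | succ f ih =>
    intro fB i buf h1 hfA hfB hinv
    cases fB with
    | zero => omega
    | succ g =>
      by_cases hi : i < lines.length
      · rw [List.drop_eq_getElem_cons hi]
        by_cases hemp : lines[i] = ""
        · simp only [pvALoop, pvBLoop]
          rw [dif_pos hi, if_pos hemp, if_pos hemp]
        · have hcast : ((i : Nat) : Int) + 1 = ((i + 1 : Nat) : Int) := by omega
          by_cases hdef : PySem.Chars.startswith (lines[i]).toList "define ".toList = true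
          · -- define
            have hdecl : pvIsDeclLine (lines[i]) = true := by
              unfold pvIsDeclLine; rw [hdef]; rfl
            simp only [pvALoop, pvBLoop]
            rw [dif_pos hi, if_neg hemp, if_neg hemp, if_pos ((pvIsDefine _).2 hdef),
                pvFindDefine _ hdef]
            simp only [pvIdentEq, pvIdentB, hinv]
            rw [if_neg (by decide : ¬ ("definition" : String) = "proof")]
            congr 1
            rw [hcast]
            exact ih g (i + 1) [] (by omega) (by omega) (by omega)
              (pvInvStop lines i (pvDeclStopAt lines i hi hdecl))
          · by_cases hax : PySem.Chars.startswith (lines[i]).toList "axiom ".toList = true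
            · -- axiom
              have hdecl : pvIsDeclLine (lines[i]) = true := by
                unfold pvIsDeclLine; rw [hax]; simp
              simp only [pvALoop, pvBLoop]
              rw [dif_pos hi, if_neg hemp, if_neg hemp,
                  if_neg (fun hc => hdef ((pvIsDefine _).1 hc)), if_pos ((pvIsAxiom _).2 hax),
                  pvFindAxiom _ hdef hax]
              simp only [pvIdentEq, pvIdentB, hinv]
              rw [if_neg (by decide : ¬ ("axiom" : String) = "proof")]
              congr 1
              rw [hcast]
              exact ih g (i + 1) [] (by omega) (by omega) (by omega)
                (pvInvStop lines i (pvDeclStopAt lines i hi hdecl))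
            · by_cases hpr : PySem.Chars.startswith (lines[i]).toList "prove ".toList = true
              · -- prove
                simp only [pvALoop, pvBLoop]
                rw [dif_pos hi, if_neg hemp, if_neg hemp,
                    if_neg (fun hc => hdef ((pvIsDefine _).1 hc)),
                    if_neg (fun hc => hax ((pvIsAxiom _).1 hc)), if_pos ((pvIsProve _).2 hpr),
                    pvFindProve _ hdef hax hpr]
                simp only [pvIdentEq, pvIdentB, hinv]
                rw [if_pos trivial]
                obtain ⟨e1, e2, e3, e4⟩ := pvBodyEq lines (lines.length + 1) (i + 1)
                  ((lines[i]).toList) (by omega) (by omega)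
                rw [hcast, e1]
                congr 1
                apply ih g _ [] (by omega) (by omega) (by omega)
                apply pvInvStop
                intro l hl
                by_cases ht : (pvBBody lines (lines.length + 1) (i + 1) (lines[i]).toList).2 < lines.length
                · rw [List.getElem?_eq_getElem ht] at hl
                  cases hl
                  exact pvTermNotComment _ (e4 ht)
                · rw [List.getElem?_eq_none (by omega)] at hl
                  cases hl
              · -- no declaration on this line
                have hfind := pvFindNone (lines[i]).toList hdef hax hpr
                simp only [pvALoop, pvBLoop]
                rw [dif_pos hi, if_neg hemp, if_neg hemp,
                    if_neg (fun hc => hdef ((pvIsDefine _).1 hc)),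
                    if_neg (fun hc => hax ((pvIsAxiom _).1 hc)),
                    if_neg (fun hc => hpr ((pvIsProve _).1 hc)), hfind]
                by_cases hcm : PySem.Chars.startswith (lines[i]).toList ['/', '/'] = true
                · rw [if_pos hcm, hcast]
                  apply ih g (i + 1) _ (by omega) (by omega) (by omega)
                  rw [pvJoinFlatten, List.flatten_append, ← pvJoinFlatten, hinv]
                  simp only [List.flatten_cons, List.flatten_nil, List.append_nil]
                  exact (pvScan_push lines i h1 hi ((pvSlice2Iff _).2 hcm)).symm
                · rw [if_neg hcm, hcast]
                  apply ih g (i + 1) [] (by omega) (by omega) (by omega)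
                  apply pvInvStop
                  intro l hl
                  rw [List.getElem?_eq_getElem hi] at hl
                  cases hl
                  intro hc
                  exact hcm ((pvSlice2Iff _).1 hc)
      · rw [List.drop_eq_nil_of_le (by omega)]
        simp only [pvALoop, pvBLoop]
        rw [dif_neg hi]

-- (lines.takeWhile p).length = k when the first k lines satisfy p and line k does not
theorem pvTakeWhileLen {α : Type} (p : α → Bool) :
    ∀ (xs : List α) (k : Nat) (hk : k < xs.length),
      (∀ j (hj : j < xs.length), j < k → p xs[j] = true) → p (xs[k]'hk) = false →
      (xs.takeWhile p).length = k := by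
  intro xs
  induction xs with
  | nil => intro k hk; simp at hk
  | cons a t ih =>
    intro k hk hall hnk
    cases k with
    | zero =>
      have : p a = false := hnk
      simp [List.takeWhile_cons, this]
    | succ k =>
      have hpa : p a = true := hall 0 (by simp) (by omega)
      rw [List.takeWhile_cons, if_pos hpa]
      simp only [List.length_cons]
      rw [ih k (by simpa using hk) (fun j hj hjk => by
            have := hall (j + 1) (by simpa using hj) (by omega)
            simpa using this) (by simpa using hnk)]

-- B's comment-run at the head of the file: as long as only "//" lines have been seen and,
-- by ¬D (right disjunct), no declaration ends that run, the buffer's content never matters.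
theorem pvRunEq (lines : List String) (name : String)
    (hx : ∀ k (hk : k < lines.length),
      (∀ j (hj : j < lines.length), j < k → PySem.Chars.startswith (lines[j]).toList ['/', '/'] = true) →
      ¬ pvIsDeclLine (lines[k]) = true) :
    ∀ (fA fB i : Nat) (buf : List (List Char)), 1 ≤ i →
      lines.length - i < fA → lines.length - i < fB →
      (∀ j (hj : j < lines.length), j < i → PySem.Chars.startswith (lines[j]).toList ['/', '/'] = true) →
      pvALoop lines name fA (lines.drop i) (i : Int) = pvBLoop lines name fB i buf := by
  intro fA
  induction fA with
  | zero => intro fB i buf h1 hfA hfB hprev; omega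
  | succ f ih =>
    intro fB i buf h1 hfA hfB hprev
    cases fB with
    | zero => omega
    | succ g =>
      by_cases hi : i < lines.length
      · rw [List.drop_eq_getElem_cons hi]
        by_cases hemp : lines[i] = ""
        · simp only [pvALoop, pvBLoop]
          rw [dif_pos hi, if_pos hemp, if_pos hemp]
        · have hnd : ¬ pvIsDeclLine (lines[i]) = true := hx i hi hprev
          have hdef : ¬ PySem.Chars.startswith (lines[i]).toList "define ".toList = true := by
            intro hc; exact hnd (by unfold pvIsDeclLine; rw [hc]; rfl)
          have hax : ¬ PySem.Chars.startswith (lines[i]).toList "axiom ".toList = true := by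
            intro hc; exact hnd (by unfold pvIsDeclLine; rw [hc]; simp)
          have hpr : ¬ PySem.Chars.startswith (lines[i]).toList "prove ".toList = true := by
            intro hc; exact hnd (by unfold pvIsDeclLine; rw [hc]; simp)
          have hcast : ((i : Nat) : Int) + 1 = ((i + 1 : Nat) : Int) := by omega
          simp only [pvALoop, pvBLoop]
          rw [dif_pos hi, if_neg hemp, if_neg hemp,
              if_neg (fun hc => hdef ((pvIsDefine _).1 hc)),
              if_neg (fun hc => hax ((pvIsAxiom _).1 hc)),
              if_neg (fun hc => hpr ((pvIsProve _).1 hc)),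
              pvFindNone (lines[i]).toList hdef hax hpr]
          by_cases hcm : PySem.Chars.startswith (lines[i]).toList ['/', '/'] = true
          · rw [if_pos hcm, hcast]
            exact ih g (i + 1) _ (by omega) (by omega) (by omega)
              (fun j hj hji => by
                rcases Nat.lt_or_ge j i with h | h
                · exact hprev j hj h
                · have : j = i := by omega
                  subst this; exact hcm)
          · rw [if_neg hcm, hcast]
            apply pvMain lines name f g (i + 1) [] (by omega) (by omega) (by omega)
            apply pvInvStop
            intro l hl
            rw [List.getElem?_eq_getElem hi] at hl
            cases hl
            intro hc
            exact hcm ((pvSlice2Iff _).1 hc)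
      · rw [List.drop_eq_nil_of_le (by omega)]
        simp only [pvALoop, pvBLoop]
        rw [dif_neg hi]

-- ¬ (right disjunct of D_) turns a comment-run ending in a declaration into a contradiction
theorem pvNoDeclExit (lines : List String) (l0 : String) (hhd : lines.headD "" = l0)
    (hcm0 : PySem.Chars.startswith l0.toList ['/', '/'] = true) (h3 : 3 ≤ l0.toList.length)
    (hnZ : ¬ (PySem.Chars.startswith (lines.headD "").toList ['/', '/'] = true ∧
      3 ≤ (lines.headD "").toList.length ∧
      pvIsDeclLine (lines.getD
        (lines.takeWhile (fun s => PySem.Chars.startswith s.toList ['/', '/'])).length "") = true)) :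
    ∀ k (hk : k < lines.length),
      (∀ j (hj : j < lines.length), j < k → PySem.Chars.startswith (lines[j]).toList ['/', '/'] = true) →
      ¬ pvIsDeclLine (lines[k]) = true := by
  intro k hk hall hdecl
  apply hnZ
  refine ⟨by rw [hhd]; exact hcm0, by rw [hhd]; exact h3, ?_⟩
  have hkcm : PySem.Chars.startswith (lines[k]).toList ['/', '/'] = false := by
    by_contra hc
    rw [pvCommentNotDecl _ (by simpa using hc)] at hdecl
    exact absurd hdecl (by simp)
  rw [pvTakeWhileLen _ lines k hk (fun j hj hjk => hall j hj hjk) hkcm]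
  rw [List.getD_eq_getElem?_getD, List.getElem?_eq_getElem hk]
  simpa using hdecl

-- ===== VERDICT helpers =====
theorem pvJoinNil : PySem.Chars.join [] ([] : List (List Char)) = [] := by
  rw [pvJoinFlatten]; rfl

-- ----- the change region is exact: A and B differ everywhere inside D_ -----

-- replace with the single-character pattern "\n" is a character-wise flatMap
theorem pvReplaceGoChar (new : List Char) :
    ∀ (fuel : Nat) (l acc : List Char), l.length ≤ fuel →
      PySem.Chars.replace.go ['\n'] new fuel l acc
        = acc.reverse ++ l.flatMap (fun c => if c = '\n' then new else [c]) := by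
  intro fuel
  induction fuel with
  | zero =>
    intro l acc h
    have hl : l = [] := List.eq_nil_of_length_eq_zero (by omega)
    subst hl
    simp [PySem.Chars.replace.go]
  | succ f ih =>
    intro l acc h
    cases l with
    | nil => simp [PySem.Chars.replace.go]
    | cons c t =>
      rw [PySem.Chars.replace.go]
      by_cases hc : c = '\n'
      · rw [if_pos (by simp [List.isPrefixOf, hc])]
        subst hc
        rw [show List.drop (['\n'].length) ('\n' :: t) = t from rfl]
        rw [ih t _ (by simpa using h)]
        simp
      · rw [if_neg (by simp [List.isPrefixOf]; exact fun hx => hc hx.symm)]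
        rw [ih t _ (by simpa using h)]
        simp [hc]

theorem pvReplaceChar (s new : List Char) :
    PySem.Chars.replace s ['\n'] new = s.flatMap (fun c => if c = '\n' then new else [c]) := by
  unfold PySem.Chars.replace
  rw [if_neg (by decide)]
  simpa using pvReplaceGoChar new s.length s [] le_rfl

theorem pvFNe (s : List Char) (h : s ≠ []) (new : List Char) (hnew : new ≠ []) :
    s.flatMap (fun c => if c = '\n' then new else [c]) ≠ [] := by
  cases s with
  | nil => exact absurd rfl h
  | cons c t =>
    simp only [List.flatMap_cons]
    intro hc
    rcases List.append_eq_nil_iff.1 hc with ⟨h1, _⟩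
    by_cases hcn : c = '\n'
    · rw [if_pos hcn] at h1; exact hnew h1
    · rw [if_neg hcn] at h1; simp at h1

theorem pvReplaceNe (cs : List Char) (h : cs ≠ []) :
    PySem.Chars.replace cs ['\n'] "<br>".toList ≠ [] := by
  rw [pvReplaceChar]
  exact pvFNe cs h _ (by decide)

theorem pvReplaceNilEq : PySem.Chars.replace [] ['\n'] "<br>".toList = [] := by decide

theorem pvReplaceAppendNe (t0 x : List Char) (h : t0 ≠ []) :
    PySem.Chars.replace (t0 ++ x) ['\n'] "<br>".toList ≠ PySem.Chars.replace x ['\n'] "<br>".toList := by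
  rw [pvReplaceChar, pvReplaceChar, List.flatMap_append]
  intro he
  have hlen := congrArg List.length he
  rw [List.length_append] at hlen
  have h1 : t0.flatMap (fun c => if c = '\n' then "<br>".toList else [c]) ≠ [] :=
    pvFNe t0 h "<br>".toList (by decide)
  exact h1 (List.eq_nil_of_length_eq_zero (by omega))

-- both loops ignore the exact fuel as long as it dominates the remaining input
theorem pvABody_len : ∀ (rest : List String) (idx : Int) (code : List Char),
    (pvABody rest idx code).2.1.length ≤ rest.length := by
  intro rest
  induction rest with
  | nil => intro idx code; simp [pvABody]
  | cons l rs ih =>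
    intro idx code
    rw [pvABody]
    by_cases h : (l = "" ∨ PySem.List.pyGet? l.toList 0 = some '}')
    · rw [if_pos h]; simp
    · rw [if_neg h]; exact le_trans (ih _ _) (by simp)

theorem pvALoop_fuel (lines : List String) (name : String) :
    ∀ (f g : Nat) (rest : List String) (n : Int), rest.length < f → rest.length < g →
      pvALoop lines name f rest n = pvALoop lines name g rest n := by
  intro f
  induction f with
  | zero => intro g rest n hf hg; omega
  | succ f ih =>
    intro g rest n hf hg
    cases g with
    | zero => omega
    | succ g =>
      cases rest with
      | nil => simp [pvALoop]
      | cons line rs =>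
        simp only [pvALoop]
        by_cases h1 : line = ""
        · rw [if_pos h1, if_pos h1]
        · rw [if_neg h1, if_neg h1]
          by_cases h2 : PySem.List.slice line.toList none (some 7) = "define ".toList
          · rw [if_pos h2, if_pos h2]
            congr 1
            exact ih g rs (n + 1) (by simp at hf ⊢; omega) (by simp at hg ⊢; omega)
          · rw [if_neg h2, if_neg h2]
            by_cases h3 : PySem.List.slice line.toList none (some 6) = "axiom ".toList
            · rw [if_pos h3, if_pos h3]
              congr 1
              exact ih g rs (n + 1) (by simp at hf ⊢; omega) (by simp at hg ⊢; omega)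
            · rw [if_neg h3, if_neg h3]
              by_cases h4 : PySem.List.slice line.toList none (some 6) = "prove ".toList
              · rw [if_pos h4, if_pos h4]
                congr 1
                exact ih g _ _
                  (lt_of_le_of_lt (pvABody_len rs (n + 1) line.toList) (by simp at hf ⊢; omega))
                  (lt_of_le_of_lt (pvABody_len rs (n + 1) line.toList) (by simp at hg ⊢; omega))
              · rw [if_neg h4, if_neg h4]
                exact ih g rs (n + 1) (by simp at hf ⊢; omega) (by simp at hg ⊢; omega)

theorem pvBBody_ge (lines : List String) :
    ∀ (f i : Nat) (code : List Char), i ≤ (pvBBody lines f i code).2 := by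
  intro f
  induction f with
  | zero => intro i code; exact le_rfl
  | succ f ih =>
    intro i code
    rw [pvBBody]
    by_cases h : i < lines.length
    · rw [dif_pos h]
      by_cases hc : (lines[i] ≠ "" ∧ ¬ PySem.Chars.startswith (lines[i]).toList ['}'])
      · rw [if_pos hc]
        exact le_trans (Nat.le_succ i) (ih (i + 1) _)
      · rw [if_neg hc]
    · rw [dif_neg h]

theorem pvBLoop_fuel (lines : List String) (name : String) :
    ∀ (f g i : Nat) (buf : List (List Char)), lines.length - i < f → lines.length - i < g →
      pvBLoop lines name f i buf = pvBLoop lines name g i buf := by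
  intro f
  induction f with
  | zero => intro g i buf hf hg; omega
  | succ f ih =>
    intro g i buf hf hg
    cases g with
    | zero => omega
    | succ g =>
      simp only [pvBLoop]
      by_cases hi : i < lines.length
      · rw [dif_pos hi, dif_pos hi]
        by_cases hemp : lines[i] = ""
        · rw [if_pos hemp, if_pos hemp]
        · rw [if_neg hemp, if_neg hemp]
          by_cases hdef : PySem.Chars.startswith (lines[i]).toList "define ".toList = true
          · rw [pvFindDefine _ hdef]
            simp only [pvIdentB]
            rw [if_neg (by decide : ¬ ("definition" : String) = "proof"),
                if_neg (by decide : ¬ ("definition" : String) = "proof")]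
            congr 1
            exact ih g (i + 1) [] (by omega) (by omega)
          · by_cases hax : PySem.Chars.startswith (lines[i]).toList "axiom ".toList = true
            · rw [pvFindAxiom _ hdef hax]
              simp only [pvIdentB]
              rw [if_neg (by decide : ¬ ("axiom" : String) = "proof"),
                  if_neg (by decide : ¬ ("axiom" : String) = "proof")]
              congr 1
              exact ih g (i + 1) [] (by omega) (by omega)
            · by_cases hpr : PySem.Chars.startswith (lines[i]).toList "prove ".toList = true
              · rw [pvFindProve _ hdef hax hpr]
                simp only [pvIdentB]
                simp only [if_true]
                congr 1
                have hge := pvBBody_ge lines (lines.length + 1) (i + 1) ((lines[i]).toList)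
                exact ih g _ [] (by omega) (by omega)
              · rw [pvFindNone _ hdef hax hpr]
                by_cases hcm : PySem.Chars.startswith (lines[i]).toList ['/', '/'] = true
                · rw [if_pos hcm, if_pos hcm]
                  exact ih g (i + 1) _ (by omega) (by omega)
                · rw [if_neg hcm, if_neg hcm]
                  exact ih g (i + 1) [] (by omega) (by omega)
      · rw [dif_neg hi, dif_neg hi]

theorem pvNotDecl3 (s : String) (h : pvIsDeclLine s = false) :
    ¬ PySem.Chars.startswith s.toList "define ".toList = true ∧
    ¬ PySem.Chars.startswith s.toList "axiom ".toList = true ∧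
    ¬ PySem.Chars.startswith s.toList "prove ".toList = true := by
  unfold pvIsDeclLine at h
  simp only [Bool.or_eq_false_iff] at h
  refine ⟨fun hc => ?_, fun hc => ?_, fun hc => ?_⟩
  · rw [hc] at h; simp at h
  · rw [hc] at h; simp at h
  · rw [hc] at h; simp at h

theorem pvPrefixNe (s : String) (p : List Char) (hp : p ≠ [])
    (h : PySem.Chars.startswith s.toList p = true) : s ≠ "" := by
  rcases (PySem.Chars.startswith_iff _ _).1 h with ⟨t, ht⟩
  intro he
  subst he
  rw [show ("" : String).toList = [] from rfl] at ht
  rcases List.append_eq_nil_iff.1 ht with ⟨h1, -⟩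
  exact hp h1

theorem pvDeclNe (s : String) (h : pvIsDeclLine s = true) : s ≠ "" := by
  unfold pvIsDeclLine at h
  rcases Bool.or_eq_true_iff.1 h with h' | hp
  · rcases Bool.or_eq_true_iff.1 h' with hd | ha
    · exact pvPrefixNe s _ (by decide) hd
    · exact pvPrefixNe s _ (by decide) ha
  · exact pvPrefixNe s _ (by decide) hp

-- skipping a run of comment lines: A's loop just walks over them
theorem pvALoopRun (lines : List String) (name : String) :
    ∀ (d i : Nat), 1 ≤ i → i + d ≤ lines.length →
      (∀ j (hj : j < lines.length), i ≤ j → j < i + d →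
        PySem.Chars.startswith (lines[j]).toList ['/', '/'] = true) →
      pvALoop lines name (lines.length + 1) (lines.drop i) (i : Int)
        = pvALoop lines name (lines.length + 1) (lines.drop (i + d)) ((i + d : Nat) : Int) := by
  intro d
  induction d with
  | zero => intro i h1 h2 h3; rfl
  | succ d ih =>
    intro i h1 h2 h3
    have hi : i < lines.length := by omega
    have hcm : PySem.Chars.startswith (lines[i]).toList ['/', '/'] = true :=
      h3 i hi le_rfl (by omega)
    obtain ⟨hdef, hax, hpr⟩ := pvNotDecl3 _ (pvCommentNotDecl _ hcm)
    have hemp : ¬ lines[i] = "" := pvPrefixNe _ _ (by decide) hcm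
    rw [List.drop_eq_getElem_cons hi]
    have hstep : pvALoop lines name (lines.length + 1) (lines[i] :: lines.drop (i + 1)) (i : Int)
        = pvALoop lines name lines.length (lines.drop (i + 1)) ((i : Int) + 1) := by
      simp only [pvALoop]
      rw [if_neg hemp, if_neg (fun hc => hdef ((pvIsDefine _).1 hc)),
          if_neg (fun hc => hax ((pvIsAxiom _).1 hc)),
          if_neg (fun hc => hpr ((pvIsProve _).1 hc))]
    rw [hstep,
        pvALoop_fuel lines name lines.length (lines.length + 1) _ _
          (by rw [List.length_drop]; omega) (by rw [List.length_drop]; omega),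
        (by omega : ((i : Nat) : Int) + 1 = ((i + 1 : Nat) : Int)),
        (by omega : i + (d + 1) = (i + 1) + d)]
    exact ih (i + 1) (by omega) (by omega)
      (fun j hj hji hjd => h3 j hj (by omega) (by omega))

-- skipping the same run in B: the buffer collects the stripped comment lines
theorem pvBLoopRun (lines : List String) (name : String) :
    ∀ (d i : Nat) (buf : List (List Char)), 1 ≤ i → i + d ≤ lines.length →
      (∀ j (hj : j < lines.length), i ≤ j → j < i + d →
        PySem.Chars.startswith (lines[j]).toList ['/', '/'] = true) →
      pvBLoop lines name (lines.length + 1) i buf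
        = pvBLoop lines name (lines.length + 1) (i + d)
            (buf ++ ((lines.drop i).take d).map (fun s => s.toList.drop 2)) := by
  intro d
  induction d with
  | zero => intro i buf h1 h2 h3; simp
  | succ d ih =>
    intro i buf h1 h2 h3
    have hi : i < lines.length := by omega
    have hcm : PySem.Chars.startswith (lines[i]).toList ['/', '/'] = true :=
      h3 i hi le_rfl (by omega)
    obtain ⟨hdef, hax, hpr⟩ := pvNotDecl3 _ (pvCommentNotDecl _ hcm)
    have hemp : ¬ lines[i] = "" := pvPrefixNe _ _ (by decide) hcm
    have hstep : pvBLoop lines name (lines.length + 1) i buf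
        = pvBLoop lines name lines.length (i + 1)
            (buf ++ [PySem.List.slice (lines[i]).toList (some 2) none]) := by
      simp only [pvBLoop]
      rw [dif_pos hi, if_neg hemp, pvFindNone _ hdef hax hpr, if_pos hcm]
    rw [hstep,
        pvBLoop_fuel lines name lines.length (lines.length + 1) (i + 1) _ (by omega) (by omega),
        pvSliceFrom2,
        ih (i + 1) _ (by omega) (by omega)
          (fun j hj hji hjd => h3 j hj (by omega) (by omega))]
    have hseg : (lines.drop i).take (d + 1) = (lines[i]) :: (lines.drop (i + 1)).take d := by
      rw [List.drop_eq_getElem_cons hi, List.take_succ_cons]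
    rw [hseg, (by omega : (i + 1) + d = i + (d + 1))]
    simp [List.append_assoc]

-- the backward scan over a pure comment run collects exactly the stripped lines in order
theorem pvScanRun (lines : List String) :
    ∀ (d : Nat), d + 1 ≤ lines.length →
      (∀ j (hj : j < lines.length), 1 ≤ j → j < d + 1 →
        PySem.Chars.startswith (lines[j]).toList ['/', '/'] = true) →
      pvDescScan lines (lines.length + 1) (((d + 1 : Nat) : Int) - 1) []
        = (((lines.drop 1).take d).map (fun s => s.toList.drop 2)).flatten := by
  intro d
  induction d with
  | zero =>
    intro h1 h2
    rw [(by omega : ((0 + 1 : Nat) : Int) - 1 = (0 : Int)), pvScan_zero]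
    simp
  | succ d ih =>
    intro h1 h2
    have hi : d + 1 < lines.length := by omega
    have hcm : PySem.Chars.startswith (lines[d + 1]).toList ['/', '/'] = true :=
      h2 (d + 1) hi (by omega) (by omega)
    rw [pvScan_push lines (d + 1) (by omega) hi ((pvSlice2Iff _).2 hcm),
        ih (by omega) (fun j hj hj1 hjd => h2 j hj hj1 (by omega)), pvSliceFrom2]
    have hget : (lines.drop 1)[d]? = some (lines[d + 1]) := by
      rw [List.getElem?_drop, (by omega : 1 + d = d + 1)]
      exact List.getElem?_eq_getElem hi
    rw [List.take_succ, hget]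
    simp

-- extracting the description component from equal result lists
theorem pvConsDescEq (dA dB : List Char) (kd idA idB cA cB nm : String)
    (tA tB : List (String × String × String × String × String))
    (h : ((kd, idA, String.ofList dA, cA, nm) :: tA) = ((kd, idB, String.ofList dB, cB, nm) :: tB)) :
    dA = dB := by
  have h3 := congrArg (fun xs => (xs.headD ("", "", "", "", "")).2.2.1) h
  simp only [List.headD_cons] at h3
  have := congrArg String.toList h3
  rwa [String.toList_ofList, String.toList_ofList] at this

theorem pvRunElem {α : Type} (p : α → Bool) (xs : List α) (l : α)
    (hl : l ∈ xs.reverse.takeWhile p) :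
    ∃ j, ∃ hj : j < xs.length, (xs[j]'hj) = l ∧
      ∀ m (hm : m < xs.length), j ≤ m → p (xs[m]'hm) = true := by
  obtain ⟨t, ht, hteq⟩ := List.mem_iff_getElem.1 hl
  have hpre : xs.reverse.takeWhile p <+: xs.reverse := List.takeWhile_prefix p
  have htlen : t < xs.reverse.length := lt_of_lt_of_le ht hpre.length_le
  have hlenr : xs.reverse.length = xs.length := List.length_reverse
  refine ⟨xs.length - 1 - t, by omega, ?_, ?_⟩
  · have := List.IsPrefix.getElem hpre ht
    rw [hteq] at this
    rw [this, List.getElem_reverse]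
  · intro m hm hjm
    have hs : xs.length - 1 - m ≤ t := by omega
    have hsl : xs.length - 1 - m < (xs.reverse.takeWhile p).length := by omega
    have hmem : (xs.reverse.takeWhile p)[xs.length - 1 - m]'hsl ∈ xs.reverse.takeWhile p :=
      List.getElem_mem _
    have hpm := List.mem_takeWhile_imp hmem
    rw [List.IsPrefix.getElem hpre hsl, List.getElem_reverse] at hpm
    have hix : xs.length - 1 - (xs.length - 1 - m) = m := by omega
    simpa [hix] using hpm

theorem pvScanNegNe (lines : List String) :
    ∀ (f k : Nat) (acc : List Char), 1 ≤ k → k ≤ lines.length → lines.length + 1 - k < f →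
      (∀ (h : 0 < lines.length), ¬ PySem.Chars.startswith ((lines[0]'h)).toList ['/', '/'] = true) →
      (∃ j, ∃ hj : j < lines.length, j ≤ lines.length - k ∧ 3 ≤ ((lines[j]'hj)).toList.length ∧
        ∀ m (hm : m < lines.length), j ≤ m →
          PySem.Chars.startswith ((lines[m]'hm)).toList ['/', '/'] = true) →
      pvDescScan lines f (-(k : Int)) acc ≠ [] := by
  intro f
  induction f with
  | zero => intro k acc h1 h2 hf h0 hex; omega
  | succ f ih =>
    intro k acc h1 h2 hf h0 hex
    obtain ⟨j, hj, hjk, hj3, hall⟩ := hex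
    have hklen : k < lines.length := by
      rcases Nat.lt_or_ge k lines.length with h | h
      · exact h
      · exfalso
        have hk : k = lines.length := by omega
        have hj0 : j = 0 := by omega
        exact (h0 (by omega)) (by
          have := hall 0 (by omega) (by omega)
          simpa using this)
    have hidx : lines.length - k < lines.length := by omega
    have hsw : PySem.Chars.startswith ((lines[lines.length - k]'hidx)).toList ['/', '/'] = true :=
      hall _ hidx (by omega)
    have hne : ¬ (-(k : Int) = 0) := by omega
    simp only [pvDescScan, if_neg hne]
    rw [pvPyGetNeg lines k h1 (by omega), List.getElem?_eq_getElem hidx]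
    simp only [if_pos ((pvSlice2Iff _).2 hsw)]
    have hcast : -(k : Int) - 1 = -((k + 1 : Nat) : Int) := by omega
    rw [hcast]
    by_cases hjc : j = lines.length - k
    · -- the long comment line is consumed right now: the accumulator becomes nonempty
      have hd : PySem.List.slice ((lines[lines.length - k]'hidx)).toList (some 2) none ≠ [] := by
        rw [pvSliceFrom2]
        intro hc
        have := List.drop_eq_nil_iff.1 hc
        subst hjc
        omega
      rw [pvScan_acc]
      simp only [ne_eq, List.append_eq_nil_iff]
      rintro ⟨-, hc, -⟩
      exact hd hc
    · exact ih (k + 1) _ (by omega) (by omega) (by omega) h0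
        ⟨j, hj, by omega, hj3, hall⟩

-- inside the wraparound part of D_: A's first description is nonempty, B's is empty
theorem pvTightW (lines : List String) (name : String)
    (hW : 2 ≤ lines.length ∧ pvIsDeclLine (lines.headD "") = true ∧
      ∃ l ∈ lines.reverse.takeWhile (fun s => PySem.Chars.startswith s.toList ['/', '/']),
        3 ≤ l.toList.length) :
    index_file lines name ≠ index_file_alt lines name := by
  obtain ⟨hlen2, hhd, l, hl, hl3⟩ := hW
  cases lines with
  | nil => simp at hlen2
  | cons l0 rest =>
    have hhd0 : pvIsDeclLine l0 = true := by simpa using hhd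
    obtain ⟨j, hj, hjeq, hall⟩ := pvRunElem _ (l0 :: rest) l hl
    have hscan : pvDescScan (l0 :: rest) ((l0 :: rest).length + 1) (-1) [] ≠ [] := by
      have := pvScanNegNe (l0 :: rest) ((l0 :: rest).length + 1) 1 []
        (by omega) (by simp) (by simp) ?h0 ?hex
      · simpa using this
      case h0 =>
        intro h hsw
        exact pvDeclNotComment l0 hhd0 ((pvSlice2Iff _).2 (by simpa using hsw))
      case hex =>
        exact ⟨j, hj, by omega, by rw [hjeq]; simpa using hl3, hall⟩
    have hrep : PySem.Chars.replace
        (pvDescScan (l0 :: rest) ((l0 :: rest).length + 1) (-1) []) ['\n'] "<br>".toList ≠ [] :=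
      pvReplaceNe _ hscan
    have hemp : ¬ l0 = "" := pvDeclNe _ hhd0
    have hi : (0 : Nat) < (l0 :: rest).length := by simp
    have hg0 : (l0 :: rest)[0] = l0 := rfl
    intro heq
    unfold index_file index_file_alt at heq
    unfold pvIsDeclLine at hhd0
    rcases Bool.or_eq_true_iff.1 hhd0 with hh | hpr
    · rcases Bool.or_eq_true_iff.1 hh with hdef | hax
      · simp only [pvALoop, pvBLoop] at heq
        rw [dif_pos hi, hg0, if_neg hemp, if_neg hemp, if_pos ((pvIsDefine _).2 hdef),
            pvFindDefine _ hdef] at heq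
        simp only [pvIdentEq, pvIdentB] at heq
        rw [(by norm_num : (0 : Int) - 1 = (-1 : Int)), pvJoinNil,
            if_neg (by decide : ¬ ("definition" : String) = "proof")] at heq
        have := pvConsDescEq _ _ _ _ _ _ _ _ _ _ heq
        rw [pvReplaceNilEq] at this
        exact hrep this
      · simp only [pvALoop, pvBLoop] at heq
        rw [dif_pos hi, hg0, if_neg hemp, if_neg hemp] at heq
        by_cases hdef : PySem.Chars.startswith l0.toList "define ".toList = true
        · rw [if_pos ((pvIsDefine _).2 hdef), pvFindDefine _ hdef] at heq
          simp only [pvIdentEq, pvIdentB] at heq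
          rw [(by norm_num : (0 : Int) - 1 = (-1 : Int)), pvJoinNil,
              if_neg (by decide : ¬ ("definition" : String) = "proof")] at heq
          have := pvConsDescEq _ _ _ _ _ _ _ _ _ _ heq
          rw [pvReplaceNilEq] at this
          exact hrep this
        · rw [if_neg (fun hc => hdef ((pvIsDefine _).1 hc)), if_pos ((pvIsAxiom _).2 hax),
              pvFindAxiom _ hdef hax] at heq
          simp only [pvIdentEq, pvIdentB] at heq
          rw [(by norm_num : (0 : Int) - 1 = (-1 : Int)), pvJoinNil,
              if_neg (by decide : ¬ ("axiom" : String) = "proof")] at heq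
          have := pvConsDescEq _ _ _ _ _ _ _ _ _ _ heq
          rw [pvReplaceNilEq] at this
          exact hrep this
    · simp only [pvALoop, pvBLoop] at heq
      rw [dif_pos hi, hg0, if_neg hemp, if_neg hemp] at heq
      by_cases hdef : PySem.Chars.startswith l0.toList "define ".toList = true
      · rw [if_pos ((pvIsDefine _).2 hdef), pvFindDefine _ hdef] at heq
        simp only [pvIdentEq, pvIdentB] at heq
        rw [(by norm_num : (0 : Int) - 1 = (-1 : Int)), pvJoinNil,
            if_neg (by decide : ¬ ("definition" : String) = "proof")] at heq
        have := pvConsDescEq _ _ _ _ _ _ _ _ _ _ heq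
        rw [pvReplaceNilEq] at this
        exact hrep this
      · by_cases hax : PySem.Chars.startswith l0.toList "axiom ".toList = true
        · rw [if_neg (fun hc => hdef ((pvIsDefine _).1 hc)), if_pos ((pvIsAxiom _).2 hax),
              pvFindAxiom _ hdef hax] at heq
          simp only [pvIdentEq, pvIdentB] at heq
          rw [(by norm_num : (0 : Int) - 1 = (-1 : Int)), pvJoinNil,
              if_neg (by decide : ¬ ("axiom" : String) = "proof")] at heq
          have := pvConsDescEq _ _ _ _ _ _ _ _ _ _ heq
          rw [pvReplaceNilEq] at this
          exact hrep this
        · rw [if_neg (fun hc => hdef ((pvIsDefine _).1 hc)),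
              if_neg (fun hc => hax ((pvIsAxiom _).1 hc)), if_pos ((pvIsProve _).2 hpr),
              pvFindProve _ hdef hax hpr] at heq
          simp only [pvIdentEq, pvIdentB] at heq
          rw [(by norm_num : (0 : Int) - 1 = (-1 : Int)), pvJoinNil, if_pos trivial] at heq
          have := pvConsDescEq _ _ _ _ _ _ _ _ _ _ heq
          rw [pvReplaceNilEq] at this
          exact hrep this

-- inside the dropped-line-0-comment part of D_: B's first description has the extra line-0 text
theorem pvTightZ (lines : List String) (name : String)
    (hZ : PySem.Chars.startswith (lines.headD "").toList ['/', '/'] = true ∧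
      3 ≤ (lines.headD "").toList.length ∧
      pvIsDeclLine (lines.getD
        (lines.takeWhile (fun s => PySem.Chars.startswith s.toList ['/', '/'])).length "") = true) :
    index_file lines name ≠ index_file_alt lines name := by
  obtain ⟨hc0, h30, hdr⟩ := hZ
  cases lines with
  | nil =>
    rcases (PySem.Chars.startswith_iff _ _).1 hc0 with ⟨t, ht⟩
    simpa using congrArg List.length ht
  | cons l0 rest =>
    have hc0' : PySem.Chars.startswith l0.toList ['/', '/'] = true := by simpa using hc0
    have h30' : 3 ≤ l0.toList.length := by simpa using h30
    have hlen : 0 < (l0 :: rest).length := by simp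
    have htw : (l0 :: rest).takeWhile (fun s => PySem.Chars.startswith s.toList ['/', '/'])
        = l0 :: rest.takeWhile (fun s => PySem.Chars.startswith s.toList ['/', '/']) := by
      rw [List.takeWhile_cons, if_pos hc0']
    have hr1 : 1 ≤ ((l0 :: rest).takeWhile
        (fun s => PySem.Chars.startswith s.toList ['/', '/'])).length := by
      rw [htw]; simp
    have hrle : ((l0 :: rest).takeWhile
        (fun s => PySem.Chars.startswith s.toList ['/', '/'])).length ≤ (l0 :: rest).length :=
      (List.takeWhile_sublist _).length_le
    have hrlt : ((l0 :: rest).takeWhile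
        (fun s => PySem.Chars.startswith s.toList ['/', '/'])).length < (l0 :: rest).length := by
      rcases Nat.lt_or_ge ((l0 :: rest).takeWhile
          (fun s => PySem.Chars.startswith s.toList ['/', '/'])).length (l0 :: rest).length with h | h
      · exact h
      · exfalso
        rw [List.getD_eq_getElem?_getD, List.getElem?_eq_none (by omega)] at hdr
        exact absurd hdr (by decide)
    have hdecl : pvIsDeclLine ((l0 :: rest)[((l0 :: rest).takeWhile
        (fun s => PySem.Chars.startswith s.toList ['/', '/'])).length]'hrlt) = true := by
      rw [List.getD_eq_getElem?_getD, List.getElem?_eq_getElem hrlt] at hdr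
      simpa using hdr
    have hcom : ∀ j (hj : j < (l0 :: rest).length),
        j < ((l0 :: rest).takeWhile (fun s => PySem.Chars.startswith s.toList ['/', '/'])).length →
        PySem.Chars.startswith ((l0 :: rest)[j]).toList ['/', '/'] = true := by
      intro j hj hjr
      have hpre := List.takeWhile_prefix
        (l := l0 :: rest) (fun s => PySem.Chars.startswith s.toList ['/', '/'])
      have hmem : ((l0 :: rest).takeWhile
          (fun s => PySem.Chars.startswith s.toList ['/', '/']))[j]'hjr ∈
          (l0 :: rest).takeWhile (fun s => PySem.Chars.startswith s.toList ['/', '/']) :=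
        List.getElem_mem _
      have := List.mem_takeWhile_imp hmem
      rwa [List.IsPrefix.getElem hpre hjr] at this
    -- abbreviate
    generalize hrdef : ((l0 :: rest).takeWhile
        (fun s => PySem.Chars.startswith s.toList ['/', '/'])).length = r at hr1 hrle hrlt hdecl hcom
    obtain ⟨hdef0, hax0, hpr0⟩ := pvNotDecl3 _ (pvCommentNotDecl _ hc0')
    have hemp0 : ¬ l0 = "" := pvPrefixNe _ _ (by decide) hc0'
    -- walk A to position r
    have hA : index_file (l0 :: rest) name
        = pvALoop (l0 :: rest) name ((l0 :: rest).length + 1) ((l0 :: rest).drop r)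
            ((r : Nat) : Int) := by
      unfold index_file
      have h0 : pvALoop (l0 :: rest) name ((l0 :: rest).length + 1) (l0 :: rest) 0
          = pvALoop (l0 :: rest) name ((l0 :: rest).length) rest ((0 : Int) + 1) := by
        simp only [pvALoop]
        rw [if_neg hemp0, if_neg (fun hc => hdef0 ((pvIsDefine _).1 hc)),
            if_neg (fun hc => hax0 ((pvIsAxiom _).1 hc)),
            if_neg (fun hc => hpr0 ((pvIsProve _).1 hc))]
      have h1 : pvALoop (l0 :: rest) name ((l0 :: rest).length) rest ((0 : Int) + 1)
          = pvALoop (l0 :: rest) name ((l0 :: rest).length + 1) rest ((1 : Nat) : Int) := by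
        rw [(by norm_num : (0 : Int) + 1 = ((1 : Nat) : Int))]
        exact pvALoop_fuel (l0 :: rest) name ((l0 :: rest).length) ((l0 :: rest).length + 1)
          rest _ (by simp) (by simp)
      have h2 := pvALoopRun (l0 :: rest) name (r - 1) 1 (by omega) (by omega)
        (fun j hj hj1 hjr => hcom j hj (by omega))
      rw [(by omega : 1 + (r - 1) = r)] at h2
      exact h0.trans (h1.trans h2)
    -- walk B to position r
    have hB : index_file_alt (l0 :: rest) name
        = pvBLoop (l0 :: rest) name ((l0 :: rest).length + 1) r
            (([l0.toList.drop 2] : List (List Char))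
              ++ (((l0 :: rest).drop 1).take (r - 1)).map (fun s => s.toList.drop 2)) := by
      unfold index_file_alt
      have h0 : pvBLoop (l0 :: rest) name ((l0 :: rest).length + 1) 0 []
          = pvBLoop (l0 :: rest) name ((l0 :: rest).length) 1
              ([] ++ [PySem.List.slice l0.toList (some 2) none]) := by
        simp only [pvBLoop]
        rw [dif_pos hlen]
        rw [show (l0 :: rest)[0] = l0 from rfl]
        rw [if_neg hemp0, pvFindNone _ hdef0 hax0 hpr0, if_pos hc0']
      have h1 : pvBLoop (l0 :: rest) name ((l0 :: rest).length) 1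
            ([] ++ [PySem.List.slice l0.toList (some 2) none])
          = pvBLoop (l0 :: rest) name ((l0 :: rest).length + 1) 1 [l0.toList.drop 2] := by
        rw [pvSliceFrom2]
        exact pvBLoop_fuel (l0 :: rest) name ((l0 :: rest).length) ((l0 :: rest).length + 1) 1 _
          (by simp) (by simp)
      have h2 := pvBLoopRun (l0 :: rest) name (r - 1) 1 [l0.toList.drop 2] (by omega) (by omega)
        (fun j hj hj1 hjr => hcom j hj (by omega))
      rw [(by omega : 1 + (r - 1) = r)] at h2
      exact h0.trans (h1.trans h2)
    -- A's description at r vs B's buffered description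
    have hscan : pvDescScan (l0 :: rest) ((l0 :: rest).length + 1) (((r : Nat) : Int) - 1) []
        = ((((l0 :: rest).drop 1).take (r - 1)).map (fun s => s.toList.drop 2)).flatten := by
      have := pvScanRun (l0 :: rest) (r - 1) (by omega)
        (fun j hj hj1 hjr => hcom j hj (by omega))
      rwa [(by omega : r - 1 + 1 = r)] at this
    have hjoinB : PySem.Chars.join []
        (([l0.toList.drop 2] : List (List Char))
          ++ (((l0 :: rest).drop 1).take (r - 1)).map (fun s => s.toList.drop 2))
        = l0.toList.drop 2
            ++ ((((l0 :: rest).drop 1).take (r - 1)).map (fun s => s.toList.drop 2)).flatten := by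
      rw [pvJoinFlatten]
      simp
    have ht0 : l0.toList.drop 2 ≠ [] := by
      intro h
      have := List.drop_eq_nil_iff.1 h
      omega
    have hdne : PySem.Chars.replace
          (pvDescScan (l0 :: rest) ((l0 :: rest).length + 1) (((r : Nat) : Int) - 1) [])
          ['\n'] "<br>".toList
        ≠ PySem.Chars.replace (PySem.Chars.join []
            (([l0.toList.drop 2] : List (List Char))
              ++ (((l0 :: rest).drop 1).take (r - 1)).map (fun s => s.toList.drop 2)))
          ['\n'] "<br>".toList := by
      rw [hscan, hjoinB]
      exact fun h => pvReplaceAppendNe _ _ ht0 h.symm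
    -- unfold one declaration step on each side and compare the head descriptions
    have hempr : ¬ (l0 :: rest)[r] = "" := pvDeclNe _ hdecl
    intro heq
    rw [hA, hB, List.drop_eq_getElem_cons hrlt] at heq
    unfold pvIsDeclLine at hdecl
    rcases Bool.or_eq_true_iff.1 hdecl with hh | hpr
    · rcases Bool.or_eq_true_iff.1 hh with hdef | hax
      · simp only [pvALoop, pvBLoop] at heq
        rw [dif_pos hrlt, if_neg hempr, if_neg hempr, if_pos ((pvIsDefine _).2 hdef),
            pvFindDefine _ hdef] at heq
        simp only [pvIdentEq, pvIdentB] at heq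
        rw [if_neg (by decide : ¬ ("definition" : String) = "proof")] at heq
        exact hdne (pvConsDescEq _ _ _ _ _ _ _ _ _ _ heq)
      · simp only [pvALoop, pvBLoop] at heq
        rw [dif_pos hrlt, if_neg hempr, if_neg hempr] at heq
        by_cases hdef : PySem.Chars.startswith ((l0 :: rest)[r]).toList "define ".toList = true
        · rw [if_pos ((pvIsDefine _).2 hdef), pvFindDefine _ hdef] at heq
          simp only [pvIdentEq, pvIdentB] at heq
          rw [if_neg (by decide : ¬ ("definition" : String) = "proof")] at heq
          exact hdne (pvConsDescEq _ _ _ _ _ _ _ _ _ _ heq)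
        · rw [if_neg (fun hc => hdef ((pvIsDefine _).1 hc)), if_pos ((pvIsAxiom _).2 hax),
              pvFindAxiom _ hdef hax] at heq
          simp only [pvIdentEq, pvIdentB] at heq
          rw [if_neg (by decide : ¬ ("axiom" : String) = "proof")] at heq
          exact hdne (pvConsDescEq _ _ _ _ _ _ _ _ _ _ heq)
    · simp only [pvALoop, pvBLoop] at heq
      rw [dif_pos hrlt, if_neg hempr, if_neg hempr] at heq
      by_cases hdef : PySem.Chars.startswith ((l0 :: rest)[r]).toList "define ".toList = true
      · rw [if_pos ((pvIsDefine _).2 hdef), pvFindDefine _ hdef] at heq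
        simp only [pvIdentEq, pvIdentB] at heq
        rw [if_neg (by decide : ¬ ("definition" : String) = "proof")] at heq
        exact hdne (pvConsDescEq _ _ _ _ _ _ _ _ _ _ heq)
      · by_cases hax : PySem.Chars.startswith ((l0 :: rest)[r]).toList "axiom ".toList = true
        · rw [if_neg (fun hc => hdef ((pvIsDefine _).1 hc)), if_pos ((pvIsAxiom _).2 hax),
              pvFindAxiom _ hdef hax] at heq
          simp only [pvIdentEq, pvIdentB] at heq
          rw [if_neg (by decide : ¬ ("axiom" : String) = "proof")] at heq
          exact hdne (pvConsDescEq _ _ _ _ _ _ _ _ _ _ heq)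
        · rw [if_neg (fun hc => hdef ((pvIsDefine _).1 hc)),
              if_neg (fun hc => hax ((pvIsAxiom _).1 hc)), if_pos ((pvIsProve _).2 hpr),
              pvFindProve _ hdef hax hpr] at heq
          simp only [pvIdentEq, pvIdentB] at heq
          rw [if_pos trivial] at heq
          exact hdne (pvConsDescEq _ _ _ _ _ _ _ _ _ _ heq)

theorem index_file_spec : Claim_unchanged_index_file := by
  intro lines name hdom hpre
  unfold Spec_index_file
  intro hnD
  unfold D_index_file at hnD
  rw [not_or] at hnD
  obtain ⟨hnW, hnZ⟩ := hnD
  unfold index_file index_file_alt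
  cases lines with
  | nil => simp [pvALoop, pvBLoop]
  | cons l0 rest =>
    have hlen : 0 < (l0 :: rest).length := by simp
    have hi : (0 : Nat) < (l0 :: rest).length := hlen
    have hdrop1 : (l0 :: rest).drop 1 = rest := rfl
    have hg0 : (l0 :: rest)[0] = l0 := rfl
    have hcast0 : ((0 : Int) + 1) = ((1 : Nat) : Int) := by norm_num
    by_cases hemp : l0 = ""
    · simp only [pvALoop, pvBLoop]
      rw [dif_pos hi, hg0, if_pos hemp, if_pos hemp]
    · by_cases hdef : PySem.Chars.startswith l0.toList "define ".toList = true
      · have hdecl : pvIsDeclLine l0 = true := by unfold pvIsDeclLine; rw [hdef]; rfl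
        have hneg : pvDescScan (l0 :: rest) ((l0 :: rest).length + 1) (-1) [] = [] :=
          pvNeg0 (l0 :: rest) hlen (by rw [hg0]; exact hdecl) hnW
        simp only [pvALoop, pvBLoop]
        rw [dif_pos hi, hg0, if_neg hemp, if_neg hemp, if_pos ((pvIsDefine _).2 hdef),
            pvFindDefine _ hdef]
        simp only [pvIdentEq, pvIdentB]
        rw [(by norm_num : (0 : Int) - 1 = (-1 : Int)), hneg, pvJoinNil,
            if_neg (by decide : ¬ ("definition" : String) = "proof")]
        congr 1
        rw [hcast0]
        exact pvMain (l0 :: rest) name ((l0 :: rest).length) ((l0 :: rest).length) 1 []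
          (by omega) (by simp) (by simp)
          (by rw [(by norm_num : ((1 : Nat) : Int) - 1 = (0 : Int)), pvScan_zero, pvJoinNil])
      · by_cases hax : PySem.Chars.startswith l0.toList "axiom ".toList = true
        · have hdecl : pvIsDeclLine l0 = true := by unfold pvIsDeclLine; rw [hax]; simp
          have hneg : pvDescScan (l0 :: rest) ((l0 :: rest).length + 1) (-1) [] = [] :=
            pvNeg0 (l0 :: rest) hlen (by rw [hg0]; exact hdecl) hnW
          simp only [pvALoop, pvBLoop]
          rw [dif_pos hi, hg0, if_neg hemp, if_neg hemp,
              if_neg (fun hc => hdef ((pvIsDefine _).1 hc)), if_pos ((pvIsAxiom _).2 hax),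
              pvFindAxiom _ hdef hax]
          simp only [pvIdentEq, pvIdentB]
          rw [(by norm_num : (0 : Int) - 1 = (-1 : Int)), hneg, pvJoinNil,
              if_neg (by decide : ¬ ("axiom" : String) = "proof")]
          congr 1
          rw [hcast0]
          exact pvMain (l0 :: rest) name ((l0 :: rest).length) ((l0 :: rest).length) 1 []
            (by omega) (by simp) (by simp)
            (by rw [(by norm_num : ((1 : Nat) : Int) - 1 = (0 : Int)), pvScan_zero, pvJoinNil])
        · by_cases hpr : PySem.Chars.startswith l0.toList "prove ".toList = true
          · have hdecl : pvIsDeclLine l0 = true := by unfold pvIsDeclLine; rw [hpr]; simp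
            have hneg : pvDescScan (l0 :: rest) ((l0 :: rest).length + 1) (-1) [] = [] :=
              pvNeg0 (l0 :: rest) hlen (by rw [hg0]; exact hdecl) hnW
            simp only [pvALoop, pvBLoop]
            rw [dif_pos hi, hg0, if_neg hemp, if_neg hemp,
                if_neg (fun hc => hdef ((pvIsDefine _).1 hc)),
                if_neg (fun hc => hax ((pvIsAxiom _).1 hc)), if_pos ((pvIsProve _).2 hpr),
                pvFindProve _ hdef hax hpr]
            simp only [pvIdentEq, pvIdentB]
            rw [(by norm_num : (0 : Int) - 1 = (-1 : Int)), hneg, pvJoinNil, if_pos trivial]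
            obtain ⟨e1, e2, e3, e4⟩ := pvBodyEq (l0 :: rest) ((l0 :: rest).length + 1) 1
              l0.toList (by omega) (by omega)
            rw [hdrop1] at e1
            rw [hcast0, e1]
            congr 1
            apply pvMain (l0 :: rest) name ((l0 :: rest).length) ((l0 :: rest).length) _ []
              (by omega) (by simp) (by simp)
            apply pvInvStop
            intro l hl
            by_cases ht : (pvBBody (l0 :: rest) ((l0 :: rest).length + 1) 1 l0.toList).2
                < (l0 :: rest).length
            · rw [List.getElem?_eq_getElem ht] at hl
              cases hl
              exact pvTermNotComment _ (e4 ht)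
            · rw [List.getElem?_eq_none (by omega)] at hl
              cases hl
          · simp only [pvALoop, pvBLoop]
            rw [dif_pos hi, hg0, if_neg hemp, if_neg hemp,
                if_neg (fun hc => hdef ((pvIsDefine _).1 hc)),
                if_neg (fun hc => hax ((pvIsAxiom _).1 hc)),
                if_neg (fun hc => hpr ((pvIsProve _).1 hc)),
                pvFindNone l0.toList hdef hax hpr]
            by_cases hcm : PySem.Chars.startswith l0.toList ['/', '/'] = true
            · rw [if_pos hcm, hcast0]
              by_cases h3 : 3 ≤ l0.toList.length
              · -- nonempty line-0 comment: ¬D (right) says the run never ends at a declaration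
                exact pvRunEq (l0 :: rest) name
                  (pvNoDeclExit (l0 :: rest) l0 rfl hcm h3 hnZ)
                  ((l0 :: rest).length) ((l0 :: rest).length) 1 _ (by omega) (by simp) (by simp)
                  (fun j hj hji => by
                    have : j = 0 := by omega
                    subst this; exact hcm)
              · -- "//" with no text: the buffered slice is empty, the invariant holds
                apply pvMain (l0 :: rest) name ((l0 :: rest).length) ((l0 :: rest).length) 1 _
                  (by omega) (by simp) (by simp)
                rw [(by norm_num : ((1 : Nat) : Int) - 1 = (0 : Int)), pvScan_zero,
                    pvJoinFlatten]
                have : PySem.List.slice l0.toList (some 2) none = [] := by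
                  rw [pvSliceFrom2]
                  exact List.drop_eq_nil_iff.2 (by omega)
                simp [this]
            · rw [if_neg hcm, hcast0]
              apply pvMain (l0 :: rest) name ((l0 :: rest).length) ((l0 :: rest).length) 1 []
                (by omega) (by simp) (by simp)
              rw [(by norm_num : ((1 : Nat) : Int) - 1 = (0 : Int)), pvScan_zero, pvJoinNil]

theorem index_file_changed : Claim_changed_index_file := by
  unfold Claim_changed_index_file
  refine ⟨by decide, by decide, by decide, by decide, by decide, by decide⟩

theorem index_file_tight : Claim_exact_index_file := by
  intro lines name hdom hpre hD
  unfold D_index_file at hD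
  rcases hD with hW | hZ
  · exact pvTightW lines name hW
  · exact pvTightZ lines name hZ
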